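-- pv_equiv track=rewrite | github.com/Huijiny/TIL | algorithm/월간코딩테스트시즌2/1/sol.py | solution
-- ===== SOURCE A (Python) =====
-- def solution(absolutes, signs):
--     answer = 0
--     for i in range(len(absolutes)):
--         if signs[i]:
--             answer += absolutes[i]
--         else:
--             answer += (absolutes[i] * -1)
--     return answer
-- ===== SOURCE B (Python) =====
-- def solution(absolutes, signs):
--     total = sum(absolutes)
--     return total - 2 * sum(a for a, s in zip(absolutes, signs) if not s)
-- ===== Notes on version B (the rewrite author's own statement) =====
-- stated objective: alternative
-- what changed: B computes the grand total of all absolutes first, then subtracts twice the sum of the negatively-signed entries, replacing A's per-element branch-and-accumulate index loop with a whole-list sum plus a corrective pass over zip.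
import Mathlib
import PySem

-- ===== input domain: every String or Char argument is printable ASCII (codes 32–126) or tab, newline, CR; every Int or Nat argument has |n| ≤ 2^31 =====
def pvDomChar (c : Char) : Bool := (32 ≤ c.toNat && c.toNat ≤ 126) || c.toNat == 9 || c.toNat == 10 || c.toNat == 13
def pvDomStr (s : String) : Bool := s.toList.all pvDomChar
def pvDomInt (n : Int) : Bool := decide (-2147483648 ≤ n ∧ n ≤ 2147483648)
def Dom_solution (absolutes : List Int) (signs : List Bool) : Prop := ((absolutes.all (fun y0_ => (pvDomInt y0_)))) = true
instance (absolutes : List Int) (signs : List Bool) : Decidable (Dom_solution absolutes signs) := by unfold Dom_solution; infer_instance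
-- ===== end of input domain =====

-- B replaces A's per-index branch-and-accumulate loop by a whole-list sum followed by
-- subtracting twice the sum of the negatively-signed entries (alternative decomposition).


-- ===== PORT A =====
def solution (absolutes : List Int) (signs : List Bool) : Int :=
  (PySem.List.pyRange 0 (absolutes.length : Int) 1).foldl
    (fun answer i =>
      if PySem.List.pyGetD signs i false then
        answer + PySem.List.pyGetD absolutes i 0
      else
        answer + PySem.List.pyGetD absolutes i 0 * (-1)) 0

-- ===== PORT B =====
def solution_alt (absolutes : List Int) (signs : List Bool) : Int :=
  let total := absolutes.foldl (· + ·) 0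
  total - 2 * ((absolutes.zip signs).foldl (fun acc p => if p.2 then acc else acc + p.1) 0)

-- ===== PRECONDITION & SPEC =====
-- A indexes signs[i] for every i < len(absolutes); it raises IndexError when signs is shorter.
def Pre_solution (absolutes : List Int) (signs : List Bool) : Prop :=
  absolutes.length ≤ signs.length
instance (absolutes : List Int) (signs : List Bool) : Decidable (Pre_solution absolutes signs) := by unfold Pre_solution; infer_instance
def pvWitness_solution : List Int × List Bool := ([4, 7, 12], [true, false, true])

def Spec_solution (absolutes : List Int) (signs : List Bool) (out : Int) : Prop := out = solution_alt absolutes signs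
instance (absolutes : List Int) (signs : List Bool) (out : Int) : Decidable (Spec_solution absolutes signs out) := by unfold Spec_solution; infer_instance

-- ===== CLAIM (what is proved, stated in full; the proofs are below) =====
def Claim_equal_solution : Prop := ∀ (absolutes : List Int) (signs : List Bool), Dom_solution absolutes signs → Pre_solution absolutes signs → Spec_solution absolutes signs (solution absolutes signs)

-- ===== LEMMAS AND PROOFS =====

-- generalized-accumulator sum form of a foldl that adds f of each element
theorem pv_fold_sum {α : Type} (f : α → Int) (l : List α) :
    ∀ acc : Int, l.foldl (fun a x => a + f x) acc = acc + (l.map f).sum := by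
  induction l with
  | nil => intro acc; simp
  | cons x xs ih => intro acc; simp [ih]; ring

-- A's index loop over range(len absolutes) equals a signed sum over the zip
theorem pv_A_loop (absolutes : List Int) :
    ∀ (signs : List Bool) (acc : Int), absolutes.length ≤ signs.length →
    (List.range absolutes.length).foldl
      (fun answer k =>
        if signs.getD k false then answer + absolutes.getD k 0
        else answer + absolutes.getD k 0 * (-1)) acc
    = acc + ((absolutes.zip signs).map (fun p => if p.2 then p.1 else -p.1)).sum := by
  induction absolutes with
  | nil => intro signs acc _; simp
  | cons a as ih =>
    intro signs acc h
    cases signs with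
    | nil => simp at h
    | cons s ss =>
      simp only [List.length_cons, List.range_succ_eq_map, List.foldl_cons, List.foldl_map,
        List.getD_cons_succ, List.getD_cons_zero, List.zip_cons_cons, List.map_cons,
        List.sum_cons]
      rw [ih ss _ (by simpa using h)]
      cases s <;> simp <;> ring

theorem pv_foldl_if (l : List (Int × Bool)) :
    ∀ acc : Int, l.foldl (fun acc p => if p.2 then acc else acc + p.1) acc
    = l.foldl (fun acc p => acc + (if p.2 then 0 else p.1)) acc := by
  induction l with
  | nil => intro acc; rfl
  | cons p l ih => intro acc; rcases p with ⟨a, s⟩; cases s <;> simp [ih]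

theorem pv_signed_sum (l : List (Int × Bool)) :
    (l.map (fun p => if p.2 then p.1 else -p.1)).sum
    = (l.map Prod.fst).sum - 2 * (l.map (fun p => if p.2 then 0 else p.1)).sum := by
  induction l with
  | nil => simp
  | cons p l ih =>
    rcases p with ⟨a, s⟩
    cases s <;> simp [ih] <;> ring

-- ===== VERDICT (by name: the statement is the Claim_ definition above) =====
theorem solution_spec : Claim_equal_solution := by
  intro absolutes signs _ hpre
  unfold Spec_solution solution solution_alt
  rw [PySem.List.pyRange_zero_nat]
  simp only [List.foldl_map, PySem.List.pyGetD_natCast]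
  rw [pv_A_loop absolutes signs 0 hpre, pv_foldl_if, pv_fold_sum, pv_signed_sum,
    List.map_fst_zip hpre]
  rw [pv_fold_sum]
  have hid : List.map (fun x2 : Int => x2) absolutes = absolutes := by simp
  rw [hid]; ring
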